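-- pv_equiv track=rewrite | github.com/coolcrazycool/python_Algor_Geek | venv/Lesson_7/les_7_task_3.py | med_finder
-- ===== SOURCE A (Python) =====
-- def med_finder(array):
--     for id_f, value_f in enumerate(array):
--         less_counter = 0
--         bigger_counter = 0
--         equal_counter = 0
--         for id_s, value_s in enumerate(array):
--             if id_f == id_s:
--                 continue
--             elif value_f > value_s:
--                 bigger_counter += 1
--             elif value_f < value_s:
--                 less_counter += 1
--             else:
--                 equal_counter += 1
--         if less_counter == len(array) // 2 and bigger_counter == len(array) // 2\
--             or (less_counter + equal_counter) == len(array) // 2 and bigger_counter == len(array) // 2\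
--             or less_counter == len(array) // 2 and (bigger_counter + equal_counter) == len(array) // 2:
--             return value_f
-- ===== SOURCE B (Python) =====
-- def med_finder(array):
--     n = len(array)
--     m = n // 2
--     cnt = {}
--     for v in array:
--         cnt[v] = cnt.get(v, 0) + 1
--     less = {}
--     acc = 0
--     for v in sorted(cnt):
--         less[v] = acc
--         acc += cnt[v]
--     for v in array:
--         lo = less[v]
--         eq = cnt[v] - 1
--         hi = n - lo - cnt[v]
--         if (hi == m and lo == m) or (hi + eq == m and lo == m) or (hi == m and lo + eq == m):
--             return v
--     return None
-- ===== Notes on version B (the rewrite author's own statement) =====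
-- stated objective: faster
-- what changed: Replaced A's nested pairwise less/greater/equal counting per element by one counting dict, a prefix-sum over the sorted distinct values, and a single original-order scan applying the same conditions.
import Mathlib
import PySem

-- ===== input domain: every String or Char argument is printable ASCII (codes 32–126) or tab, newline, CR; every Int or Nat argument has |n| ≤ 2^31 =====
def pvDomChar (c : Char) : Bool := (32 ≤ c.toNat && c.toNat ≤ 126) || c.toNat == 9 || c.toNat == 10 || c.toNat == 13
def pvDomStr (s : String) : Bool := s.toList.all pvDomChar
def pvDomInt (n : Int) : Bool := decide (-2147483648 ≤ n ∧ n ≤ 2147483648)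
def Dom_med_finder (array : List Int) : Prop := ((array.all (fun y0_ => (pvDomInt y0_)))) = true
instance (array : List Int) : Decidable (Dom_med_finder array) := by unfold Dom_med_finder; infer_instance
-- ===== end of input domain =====

-- B replaces A's quadratic pairwise counting by one counting pass plus a prefix-sum over the
-- sorted distinct values, then a single original-order scan applying the same conditions.

-- ===== PORT A =====
-- outer loop of A over enumerate(array); the inner loop is the foldl over enumerate(array)
def medAGo (array : List Int) : List (Int × Int) → Option Int
  | [] => none
  | (idf, vf) :: rest =>
    let c := (PySem.List.enumerate array 0).foldl (fun (s : Int × Int × Int) p =>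
      if idf == p.1 then s
      else if vf > p.2 then (s.1, s.2.1 + 1, s.2.2)
      else if vf < p.2 then (s.1 + 1, s.2.1, s.2.2)
      else (s.1, s.2.1, s.2.2 + 1)) ((0 : Int), (0 : Int), (0 : Int))
    let m := PySem.Int.floordiv (array.length : Int) 2
    if (c.1 = m ∧ c.2.1 = m) ∨ (c.1 + c.2.2 = m ∧ c.2.1 = m) ∨ (c.1 = m ∧ c.2.1 + c.2.2 = m)
    then some vf else medAGo array rest

def med_finder (array : List Int) : Option Int := medAGo array (PySem.List.enumerate array 0)

-- ===== PORT B =====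
def med_finder_alt (array : List Int) : Option Int :=
  let n : Int := array.length
  let m := PySem.Int.floordiv n 2
  let cnt := array.foldl (fun (d : PySem.Dict Int Int) v => d.insert v (d.getD v 0 + 1)) PySem.Dict.empty
  let p := (PySem.List.sorted cnt.keys (fun x => x) false).foldl
      (fun (s : PySem.Dict Int Int × Int) v => (s.1.insert v s.2, s.2 + cnt.getD v 0))
      (PySem.Dict.empty, (0 : Int))
  let less := p.1
  array.find? (fun v =>
    let lo := less.getD v 0
    let eq := cnt.getD v 0 - 1
    let hi := n - lo - cnt.getD v 0
    decide ((hi = m ∧ lo = m) ∨ (hi + eq = m ∧ lo = m) ∨ (hi = m ∧ lo + eq = m)))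

-- ===== PRECONDITION & SPEC =====
def Spec_med_finder (array : List Int) (out : Option Int) : Prop := out = med_finder_alt array
instance (array : List Int) (out : Option Int) : Decidable (Spec_med_finder array out) := by unfold Spec_med_finder; infer_instance

-- ===== CLAIM (what is proved, stated in full; the proofs are below) =====
def Claim_equal_med_finder : Prop := ∀ (array : List Int), Dom_med_finder array → Spec_med_finder array (med_finder array)

-- ===== LEMMAS AND PROOFS =====

-- the condition both programs test, expressed via whole-list counts
def pvCond (array : List Int) (v : Int) : Bool :=
  let m := PySem.Int.floordiv (array.length : Int) 2
  let lo : Int := array.countP (fun x => decide (x < v))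
  let hi : Int := array.countP (fun x => decide (v < x))
  let eq : Int := (array.count v : Int) - 1
  decide ((hi = m ∧ lo = m) ∨ (hi + eq = m ∧ lo = m) ∨ (hi = m ∧ lo + eq = m))

theorem count_trichotomy (l : List Int) (v : Int) :
    l.countP (fun x => decide (x < v)) + l.count v + l.countP (fun x => decide (v < x)) = l.length := by
  induction l with
  | nil => simp
  | cons x t ih =>
    simp only [List.countP_cons, List.count_cons, List.length_cons]
    rcases lt_trichotomy x v with h | h | h <;>
      simp [h, not_lt_of_gt, beq_iff_eq, ne_of_lt, ne_of_gt] <;> omega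

theorem find?_congr_mem {α : Type} (l : List α) (p q : α → Bool)
    (h : ∀ x ∈ l, p x = q x) : l.find? p = l.find? q := by
  induction l with
  | nil => rfl
  | cons x t ih =>
    simp only [List.find?_cons, h x (by simp)]
    cases q x <;> simp [ih (fun y hy => h y (by simp [hy]))]

-- A's inner loop over a segment none of whose indices is idf just adds the three counts
theorem medA_inner_no_skip (l : List Int) (s idf vf : Int) (a b c : Int)
    (h : ∀ p ∈ PySem.List.enumerate l s, idf ≠ p.1) :
    (PySem.List.enumerate l s).foldl (fun (st : Int × Int × Int) p =>
      if idf == p.1 then st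
      else if vf > p.2 then (st.1, st.2.1 + 1, st.2.2)
      else if vf < p.2 then (st.1 + 1, st.2.1, st.2.2)
      else (st.1, st.2.1, st.2.2 + 1)) (a, b, c)
    = (a + l.countP (fun x => decide (vf < x)), b + l.countP (fun x => decide (x < vf)),
       c + l.count vf) := by
  induction l generalizing s a b c with
  | nil => simp [PySem.List.enumerate]
  | cons x t ih =>
    rw [PySem.List.enumerate_cons, List.foldl_cons]
    have hs : idf ≠ s := h (s, x) (by rw [PySem.List.enumerate_cons]; exact List.mem_cons_self)
    have ht : ∀ p ∈ PySem.List.enumerate t (s + 1), idf ≠ p.1 := by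
      intro p hp; exact h p (by rw [PySem.List.enumerate_cons]; exact List.mem_cons_of_mem _ hp)
    have hb : (idf == s) = false := by simpa using hs
    simp only [hb, Bool.false_eq_true, if_false]
    rcases lt_trichotomy x vf with hx | hx | hx
    · rw [if_pos (by simpa using hx), ih _ _ _ _ ht]
      simp only [List.countP_cons, List.count_cons, Prod.ext_iff]
      have h1 : decide (vf < x) = false := by simp; omega
      have h2 : decide (x < vf) = true := by simpa using hx
      have h3 : (x == vf) = false := by simp; omega
      simp [h1, h2, h3]; omega
    · rw [if_neg (by simp [hx]), if_neg (by simp [hx]), ih _ _ _ _ ht]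
      simp only [List.countP_cons, List.count_cons, Prod.ext_iff]
      have h1 : decide (vf < x) = false := by simp; omega
      have h2 : decide (x < vf) = false := by simp; omega
      have h3 : (x == vf) = true := by simpa using hx
      simp [h1, h2, h3]; omega
    · rw [if_neg (by simp; omega), if_pos (by simpa using hx), ih _ _ _ _ ht]
      simp only [List.countP_cons, List.count_cons, Prod.ext_iff]
      have h1 : decide (vf < x) = true := by simpa using hx
      have h2 : decide (x < vf) = false := by simp; omega
      have h3 : (x == vf) = false := by simp; omega
      simp [h1, h2, h3]; omega

-- A's inner loop with the skipped index in the middle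
theorem medA_inner_counts' (T D : List Int) (v : Int) :
    (PySem.List.enumerate (T ++ v :: D) 0).foldl (fun (st : Int × Int × Int) p =>
      if (T.length : Int) == p.1 then st
      else if v > p.2 then (st.1, st.2.1 + 1, st.2.2)
      else if v < p.2 then (st.1 + 1, st.2.1, st.2.2)
      else (st.1, st.2.1, st.2.2 + 1)) ((0 : Int), (0 : Int), (0 : Int))
    = (((T ++ v :: D).countP (fun x => decide (v < x)) : Int),
       ((T ++ v :: D).countP (fun x => decide (x < v)) : Int),
       ((T ++ v :: D).count v : Int) - 1) := by
  rw [PySem.List.enumerate_append, PySem.List.enumerate_cons, List.foldl_append, List.foldl_cons]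
  rw [medA_inner_no_skip _ _ _ _ _ _ _ (by
    intro p hp
    rw [PySem.List.mem_enumerate_iff] at hp
    obtain ⟨j, hj, rfl⟩ := hp
    simp; omega)]
  have hb : ((T.length : Int) == 0 + (T.length : Int)) = true := by simp
  rw [hb, if_pos rfl]
  rw [medA_inner_no_skip _ _ _ _ _ _ _ (by
    intro p hp
    rw [PySem.List.mem_enumerate_iff] at hp
    obtain ⟨j, hj, rfl⟩ := hp
    simp; omega)]
  have h1 : decide (v < v) = false := by simp
  have h3 : (v == v) = true := by simp
  simp only [List.countP_append, List.countP_cons, List.count_append, List.count_cons, h1, h3,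
    Prod.ext_iff]
  refine ⟨by push_cast; omega, by push_cast; omega, by push_cast; omega⟩

theorem medA_inner_counts (array : List Int) (k : Nat) (hk : k < array.length) :
    (PySem.List.enumerate array 0).foldl (fun (st : Int × Int × Int) p =>
      if (k : Int) == p.1 then st
      else if array[k] > p.2 then (st.1, st.2.1 + 1, st.2.2)
      else if array[k] < p.2 then (st.1 + 1, st.2.1, st.2.2)
      else (st.1, st.2.1, st.2.2 + 1)) ((0 : Int), (0 : Int), (0 : Int))
    = ((array.countP (fun x => decide (array[k] < x)) : Int),
       (array.countP (fun x => decide (x < array[k])) : Int),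
       (array.count array[k] : Int) - 1) := by
  obtain ⟨v, hv⟩ : ∃ v, array[k] = v := ⟨_, rfl⟩
  set T := array.take k with hT
  set D := array.drop (k + 1) with hD
  have hsplit : array = T ++ v :: D := by
    rw [hT, hD, ← hv, ← List.drop_eq_getElem_cons hk, List.take_append_drop]
  have hlen : T.length = k := by simp [hT, List.length_take]; omega
  rw [hv, hsplit, ← hlen]
  exact medA_inner_counts' _ _ _

theorem medAGo_eq_find (array : List Int) (pairs : List (Int × Int))
    (h : ∀ p ∈ pairs, ∃ (k : Nat) (hh : k < array.length), p = ((k : Int), array[k])) :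
    medAGo array pairs = (pairs.map (·.2)).find? (pvCond array) := by
  induction pairs with
  | nil => rfl
  | cons p rest ih =>
    obtain ⟨k, hk, rfl⟩ := h p List.mem_cons_self
    simp only [medAGo, List.map_cons, medA_inner_counts array k hk]
    by_cases hP : ((array.countP (fun x => decide (array[k] < x)) : Int) = PySem.Int.floordiv (array.length : Int) 2 ∧
        (array.countP (fun x => decide (x < array[k])) : Int) = PySem.Int.floordiv (array.length : Int) 2) ∨
        ((array.countP (fun x => decide (array[k] < x)) : Int) + ((array.count array[k] : Int) - 1) = PySem.Int.floordiv (array.length : Int) 2 ∧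
        (array.countP (fun x => decide (x < array[k])) : Int) = PySem.Int.floordiv (array.length : Int) 2) ∨
        ((array.countP (fun x => decide (array[k] < x)) : Int) = PySem.Int.floordiv (array.length : Int) 2 ∧
        (array.countP (fun x => decide (x < array[k])) : Int) + ((array.count array[k] : Int) - 1) = PySem.Int.floordiv (array.length : Int) 2)
    · rw [if_pos hP, List.find?_cons_of_pos (by simp only [pvCond, decide_eq_true_eq]; exact hP)]
    · rw [if_neg hP, List.find?_cons_of_neg (by simp only [pvCond, Bool.not_eq_true, decide_eq_false_iff_not]; exact hP),
        ih (fun q hq => h q (List.mem_cons_of_mem _ hq))]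

theorem medA_eq_find (array : List Int) :
    med_finder array = array.find? (pvCond array) := by
  rw [med_finder, medAGo_eq_find array _ (by
    intro p hp
    rw [PySem.List.mem_enumerate_iff] at hp
    obtain ⟨k, hk, rfl⟩ := hp
    exact ⟨k, hk, by simp⟩), PySem.List.map_snd_enumerate]

-- B's prefix-sum loop: keys not in the remaining list keep their value
theorem lessFold_preserve (g : Int → Int) (ks : List Int) (d : PySem.Dict Int Int) (a k0 : Int)
    (hk : k0 ∉ ks) :
    ((ks.foldl (fun (s : PySem.Dict Int Int × Int) v => (s.1.insert v s.2, s.2 + g v)) (d, a)).1).getD k0 0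
    = d.getD k0 0 := by
  induction ks generalizing d a with
  | nil => rfl
  | cons x t ih =>
    simp only [List.foldl_cons]
    rw [ih _ _ (fun h => hk (List.mem_cons_of_mem _ h)), PySem.Dict.getD_insert,
      if_neg (by rintro rfl; exact hk List.mem_cons_self)]

-- B's prefix-sum loop over a strictly sorted key list stores, at v, the sum of g over the keys below v
theorem lessFold_getD (g : Int → Int) (ks : List Int) (d : PySem.Dict Int Int) (a v : Int)
    (hs : ks.Pairwise (· < ·)) (hv : v ∈ ks) :
    ((ks.foldl (fun (s : PySem.Dict Int Int × Int) w => (s.1.insert w s.2, s.2 + g w)) (d, a)).1).getD v 0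
    = a + ((ks.filter (fun k => decide (k < v))).map g).sum := by
  induction ks generalizing d a with
  | nil => cases hv
  | cons x t ih =>
    rw [List.pairwise_cons] at hs
    obtain ⟨hx, ht⟩ := hs
    simp only [List.foldl_cons]
    rcases List.mem_cons.mp hv with rfl | hv
    · have hnt : v ∉ t := fun h => lt_irrefl v (hx v h)
      rw [lessFold_preserve _ _ _ _ _ hnt, PySem.Dict.getD_insert, if_pos rfl]
      have hfil : (v :: t).filter (fun k => decide (k < v)) = [] := by
        rw [List.filter_eq_nil_iff]
        intro k hk
        rcases List.mem_cons.mp hk with rfl | hk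
        · simp
        · simp; exact le_of_lt (hx k hk)
      rw [hfil]; simp
    · rw [ih (d.insert x a) (a + g x) ht hv]
      have hxv : x < v := hx v hv
      rw [List.filter_cons_of_pos (by simpa using hxv)]
      simp [List.map_cons, List.sum_cons]; ring

theorem countP_mem_cons (l : List Int) (k : Int) (L : List Int) (hk : k ∉ L) :
    l.countP (fun x => decide (x ∈ (k :: L))) = l.count k + l.countP (fun x => decide (x ∈ L)) := by
  induction l with
  | nil => simp
  | cons y t ih =>
    simp only [List.countP_cons, List.count_cons, ih]
    by_cases h1 : y = k
    · subst h1; simp [hk]; omega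
    · by_cases h2 : y ∈ L <;> simp [h1, h2, beq_iff_eq] <;> omega

-- a countP over l is the sum of per-value counts over any duplicate-free value list
theorem sum_count_nodup (L l : List Int) (hL : L.Nodup) :
    (L.map (fun k => (l.count k : Int))).sum = (l.countP (fun x => decide (x ∈ L)) : Int) := by
  induction L with
  | nil => simp
  | cons k L' ih =>
    rw [List.nodup_cons] at hL
    rw [List.map_cons, List.sum_cons, ih hL.2, countP_mem_cons l k L' hL.1]
    push_cast; ring

theorem medB_eq_find (array : List Int) :
    med_finder_alt array = array.find? (pvCond array) := by
  unfold med_finder_alt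
  simp only [PySem.Dict.foldl_insert_getD_add_one_eq_counter]
  apply find?_congr_mem
  intro v hv
  have hkeys : (PySem.Dict.counter array).keys = PySem.Set.ofList array := PySem.Dict.keys_counter array
  set ks := PySem.List.sorted (PySem.Dict.counter array).keys (fun x => x) false with hks
  have hmem : ∀ x : Int, x ∈ ks ↔ x ∈ array := by
    intro x
    rw [hks, PySem.List.mem_sorted, hkeys, PySem.Set.mem_ofList]
  have hnd : ks.Nodup := ((PySem.List.sorted_perm _ _ _).nodup_iff).mpr (PySem.Dict.nodup_keys_counter array)
  have hpl : ks.Pairwise (· < ·) := by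
    have h1 := PySem.List.sorted_pairwise (PySem.Dict.counter array).keys (fun x => x)
    exact (h1.and hnd).imp (fun h => lt_of_le_of_ne h.1 h.2)
  have hlo : ((ks.foldl (fun (s : PySem.Dict Int Int × Int) w => (s.1.insert w s.2, s.2 + (List.count w array : Int)))
      (PySem.Dict.empty, (0 : Int))).1).getD v 0 = (array.countP (fun x => decide (x < v)) : Int) := by
    rw [lessFold_getD _ _ _ _ _ hpl ((hmem v).mpr hv), zero_add]
    rw [sum_count_nodup _ _ (hnd.filter _)]
    congr 1
    apply List.countP_congr
    intro x hx
    simp [List.mem_filter, hmem x, hx]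
  simp only [PySem.Dict.getD_counter, pvCond]
  rw [hlo, decide_eq_decide]
  have tri := count_trichotomy array v
  omega

-- ===== VERDICT (by name: the statement is the Claim_ definition above) =====
theorem med_finder_spec : Claim_equal_med_finder := by
  intro array _
  unfold Spec_med_finder
  rw [medA_eq_find, medB_eq_find]
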